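-- pv_equiv track=rewrite | github.com/keerthanachowdary218/LeetCodeSolutions | 3434-find-the-number-of-distinct-colors-among-the-balls/3434-find-the-number-of-distinct-colors-among-the-balls.py | queryResults
-- ===== SOURCE A (Python) =====
-- from typing import List
--
-- def queryResults(limit: int, queries: List[List[int]]) -> List[int]:
--     '''
--     #so dont use set, memory limit exceeded., use hashmap
--     colors=[0]*(limit+1)
--     ans=[]
--     for query in queries:
--         colors[query[0]]=query[1]
--         if 0 in set(colors):
--             ans.append(len(set(colors))-1)
--         else:
--             ans.append(len(set(colors)))
--     return ans
--     '''
--     n = len(queries)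
--     result = []
--     color_map = {}
--     ball_map = {}
--     for i in range(n):
--         ball, color = queries[i]
--         if ball in ball_map:
--             prev_color = ball_map[ball]
--             color_map[prev_color] -= 1
--
--             # If there are no balls with previous color left, remove color from color map
--             if color_map[prev_color] == 0:
--                 del color_map[prev_color]
--
--         # Set color of ball to the new color
--         ball_map[ball] = color
--
--         # Increment the count of the new color
--         color_map[color] = color_map.get(color, 0) + 1
--
--         result.append(len(color_map))
--
--     return result
-- ===== SOURCE B (Python) =====
-- from typing import List
--
-- def queryResults(limit: int, queries: List[List[int]]) -> List[int]:
--     # Keep only the ball -> color map; recompute the distinct-color count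
--     # by rescanning the current colors after every query.
--     ball_map = {}
--     result = []
--     for ball, color in queries:
--         ball_map[ball] = color
--         result.append(len(set(ball_map.values())))
--     return result
-- ===== Notes on version B (the rewrite author's own statement) =====
-- stated objective: simpler
-- what changed: Drops A's incrementally maintained color->count dict (with decrement/delete bookkeeping) and instead keeps only the ball->color dict, recomputing the distinct-color count by a fresh rescan len(set(ball_map.values())) after each query.
import Mathlib
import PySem

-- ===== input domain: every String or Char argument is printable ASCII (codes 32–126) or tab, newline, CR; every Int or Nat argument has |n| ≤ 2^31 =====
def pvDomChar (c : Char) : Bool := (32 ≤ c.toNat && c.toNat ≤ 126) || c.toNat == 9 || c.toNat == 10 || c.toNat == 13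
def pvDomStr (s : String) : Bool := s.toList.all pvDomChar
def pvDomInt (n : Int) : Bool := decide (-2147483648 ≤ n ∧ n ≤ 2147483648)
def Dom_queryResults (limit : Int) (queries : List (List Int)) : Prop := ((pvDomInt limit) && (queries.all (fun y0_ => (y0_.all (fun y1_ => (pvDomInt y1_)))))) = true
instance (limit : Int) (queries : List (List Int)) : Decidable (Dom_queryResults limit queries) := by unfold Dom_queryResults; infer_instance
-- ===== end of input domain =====

-- B drops A's incrementally maintained color->count dict and recomputes the distinct-color
-- count by rescanning the ball->color map after every query (simpler, not faster).


-- ===== PORT A =====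
-- state: (color_map, (ball_map, result)); one iteration of A's for-loop
def stepA (st : PySem.Dict Int Int × PySem.Dict Int Int × List Int) (q : List Int) :
    PySem.Dict Int Int × PySem.Dict Int Int × List Int :=
  match q with
  | [ball, color] =>
    let colorMap := st.1
    let ballMap := st.2.1
    let result := st.2.2
    let colorMap :=
      if ballMap.contains ball then
        let prevColor := ballMap.getD ball 0
        let cm := colorMap.modify prevColor 0 (· - 1)
        -- If there are no balls with previous color left, remove color from color map
        if cm.getD prevColor 0 == 0 then cm.erase prevColor else cm
      else colorMap
    -- Set color of ball to the new color
    let ballMap := ballMap.insert ball color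
    -- Increment the count of the new color
    let colorMap := colorMap.insert color (colorMap.getD color 0 + 1)
    (colorMap, ballMap, result ++ [(colorMap.size : Int)])
  | _ => st  -- Python raises here (unpacking); excluded by Pre_

def queryResults (limit : Int) (queries : List (List Int)) : List Int :=
  (queries.foldl stepA (PySem.Dict.empty, PySem.Dict.empty, [])).2.2

-- ===== PORT B =====
-- state: (ball_map, result); one iteration of B's for-loop
def stepB (st : PySem.Dict Int Int × List Int) (q : List Int) :
    PySem.Dict Int Int × List Int :=
  match q with
  | [ball, color] =>
    let ballMap := st.1.insert ball color
    (ballMap, st.2 ++ [((PySem.Set.ofList ballMap.values).length : Int)])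
  | _ => st  -- Python raises here (unpacking); excluded by Pre_

def queryResults_alt (limit : Int) (queries : List (List Int)) : List Int :=
  (queries.foldl stepB (PySem.Dict.empty, [])).2

-- ===== PRECONDITION & SPEC =====
-- Pre_ excludes exactly the inputs on which both Pythons raise (a ValueError
-- unpacking a query whose length is not 2).
def Pre_queryResults (limit : Int) (queries : List (List Int)) : Prop :=
  ∀ q ∈ queries, q.length = 2
instance (limit : Int) (queries : List (List Int)) : Decidable (Pre_queryResults limit queries) := by unfold Pre_queryResults; infer_instance

def pvWitness_queryResults : Int × List (List Int) := (4, [[1, 4], [2, 5], [1, 3], [3, 4]])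

def Spec_queryResults (limit : Int) (queries : List (List Int)) (out : List Int) : Prop := out = queryResults_alt limit queries
instance (limit : Int) (queries : List (List Int)) (out : List Int) : Decidable (Spec_queryResults limit queries out) := by unfold Spec_queryResults; infer_instance

-- ===== CLAIM (what is proved, stated in full; the proofs are below) =====
def Claim_equal_queryResults : Prop := ∀ (limit : Int) (queries : List (List Int)), Dom_queryResults limit queries → Pre_queryResults limit queries → Spec_queryResults limit queries (queryResults limit queries)


-- ===== LEMMAS AND PROOFS =====

-- Invariant of A's loop: color_map is exactly the value-multiplicity table of ball_map
def DictInv (cm bm : PySem.Dict Int Int) : Prop :=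
  cm.keys.Nodup ∧ bm.keys.Nodup ∧
  (∀ x : Int, cm.getD x 0 = (bm.values.count x : Int)) ∧
  (∀ x : Int, cm.contains x = true ↔ 0 < bm.values.count x)

-- Dict.erase facts (erase filters the items list; not covered by the listed lemmas)
lemma get?_erase (d : PySem.Dict Int Int) (k x : Int) :
    (d.erase k).get? x = if x = k then none else d.get? x := by
  obtain ⟨l⟩ := d
  simp only [PySem.Dict.erase, PySem.Dict.get?, List.find?_filter]
  by_cases hx : x = k
  · obtain rfl := hx
    rw [if_pos rfl]
    have hnone : l.find?
        (fun a => decide ((!(a.1 == x)) = true ∧ (a.1 == x) = true)) = none := by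
      rw [List.find?_eq_none]
      intro a _
      cases h : (a.1 == x) <;> simp
    rw [hnone]
    rfl
  · rw [if_neg hx]
    have hpred : (fun (a : Int × Int) => decide ((!(a.1 == k)) = true ∧ (a.1 == x) = true))
        = (fun a => a.1 == x) := by
      funext a
      by_cases hak : a.1 = k
      · have hax : (a.1 == x) = false :=
          beq_eq_false_iff_ne.mpr (fun h => hx (by omega))
        simp [hax]
      · have hb : (a.1 == k) = false := beq_eq_false_iff_ne.mpr hak
        cases h : (a.1 == x) <;> simp [hb]
    rw [hpred]

lemma contains_erase (d : PySem.Dict Int Int) (k x : Int) :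
    (d.erase k).contains x = if x = k then false else d.contains x := by
  rw [PySem.Dict.contains_eq_isSome_get?, PySem.Dict.contains_eq_isSome_get?, get?_erase]
  by_cases hx : x = k <;> simp [hx]

lemma getD_erase (d : PySem.Dict Int Int) (k x d0 : Int) :
    (d.erase k).getD x d0 = if x = k then d0 else d.getD x d0 := by
  rw [PySem.Dict.getD_eq_get?_getD, PySem.Dict.getD_eq_get?_getD, get?_erase]
  by_cases hx : x = k <;> simp [hx]

lemma nodup_keys_erase (d : PySem.Dict Int Int) (k : Int) (h : d.keys.Nodup) :
    (d.erase k).keys.Nodup := by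
  obtain ⟨l⟩ := d
  simp only [PySem.Dict.erase, PySem.Dict.keys] at *
  exact h.sublist (List.Sublist.map _ List.filter_sublist)

-- rewriting an absent key changes nothing
lemma map_update_id (l : List (Int × Int)) (b c : Int) (h : ∀ p ∈ l, p.1 ≠ b) :
    l.map (fun p => if p.1 == b then (b, c) else p) = l := by
  induction l with
  | nil => rfl
  | cons p t ih =>
    have hp : p.1 ≠ b := h p (by simp)
    rw [List.map_cons, ih (fun q hq => h q (List.mem_cons_of_mem p hq))]
    simp [hp]

-- how the multiset of values changes when the entry at key b (current value prev) is rewritten to c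
lemma count_snd_update (l : List (Int × Int)) (b prev c x : Int)
    (hnd : (l.map Prod.fst).Nodup) (hmem : (b, prev) ∈ l) :
    ((l.map (fun p => if p.1 == b then (b, c) else p)).map Prod.snd).count x
      + (if x = prev then 1 else 0)
    = (l.map Prod.snd).count x + (if x = c then 1 else 0) := by
  induction l with
  | nil => simp at hmem
  | cons p t ih =>
    simp only [List.map_cons, List.nodup_cons, List.mem_map] at hnd
    rcases List.mem_cons.mp hmem with hp | hp
    · have hpe : p = (b, prev) := hp.symm
      subst hpe
      have ht : ∀ q ∈ t, q.1 ≠ b := by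
        intro q hq he
        exact hnd.1 ⟨q, hq, he⟩
      simp only [List.map_cons, beq_self_eq_true, if_true]
      rw [map_update_id t b c ht]
      simp only [List.count_cons, beq_iff_eq]
      split_ifs <;> omega
    · have hpb : p.1 ≠ b := by
        intro he
        exact hnd.1 ⟨(b, prev), hp, by simp [he]⟩
      have hrec := ih hnd.2 hp
      simp only [List.map_cons, List.count_cons, beq_iff_eq] at hrec ⊢
      rw [if_neg hpb]
      split_ifs at hrec ⊢ <;> omega

-- values/count after bm.insert b c when b is already a key with value prev
lemma count_values_insert_contains (bm : PySem.Dict Int Int) (b c x : Int)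
    (hnd : bm.keys.Nodup) (hb : bm.contains b = true) :
    ((bm.insert b c).values.count x) + (if x = bm.getD b 0 then 1 else 0)
      = bm.values.count x + (if x = c then 1 else 0) := by
  obtain ⟨v, hv⟩ : ∃ v, bm.get? b = some v := by
    rw [PySem.Dict.contains_eq_isSome_get?] at hb
    exact Option.isSome_iff_exists.mp hb
  have hgd : bm.getD b 0 = v := PySem.Dict.getD_of_get?_eq_some bm 0 hv
  have hmem : (b, v) ∈ bm.items := PySem.Dict.mem_items_of_get?_eq_some bm hv
  rw [hgd]
  have hitems := PySem.Dict.items_insert_of_contains bm c hb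
  simp only [PySem.Dict.values, hitems]
  exact count_snd_update bm.items b v c x hnd hmem

lemma count_values_insert_fresh (bm : PySem.Dict Int Int) (b c x : Int)
    (hb : bm.contains b = false) :
    (bm.insert b c).values.count x = bm.values.count x + (if x = c then 1 else 0) := by
  have hitems := PySem.Dict.items_insert_of_not_contains bm c hb
  simp only [PySem.Dict.values, hitems, List.map_append, List.count_append, List.map_cons,
    List.map_nil, List.count_cons, List.count_nil, beq_iff_eq]
  split_ifs <;> omega

lemma inv_empty : DictInv PySem.Dict.empty PySem.Dict.empty := by
  refine ⟨PySem.Dict.nodup_keys_empty, PySem.Dict.nodup_keys_empty, ?_, ?_⟩ <;>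
    simp [PySem.Dict.empty, PySem.Dict.getD, PySem.Dict.get?, PySem.Dict.contains,
      PySem.Dict.values]

lemma size_eq_of_inv {cm bm : PySem.Dict Int Int} (h : DictInv cm bm) :
    cm.size = (PySem.Set.ofList bm.values).length := by
  obtain ⟨h1, _, _, h4⟩ := h
  have hperm : cm.keys.Perm (PySem.Set.ofList bm.values) := by
    rw [List.perm_ext_iff_of_nodup h1 (PySem.Set.nodup_ofList _)]
    intro a
    rw [← PySem.Dict.contains_iff_mem_keys, PySem.Set.mem_ofList, h4 a]
    exact List.count_pos_iff
  have := hperm.length_eq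
  simpa [PySem.Dict.size, PySem.Dict.keys] using this

lemma inv_step {cm bm : PySem.Dict Int Int} (h : DictInv cm bm) (b c : Int) :
    DictInv (stepA (cm, bm, []) [b, c]).1 (bm.insert b c) := by
  obtain ⟨h1, h2, h3, h4⟩ := h
  have hbmnd : (bm.insert b c).keys.Nodup := PySem.Dict.nodup_keys_insert bm b c h2
  by_cases hcont : bm.contains b = true
  · -- rewrite of an existing ball; prev := ball_map[ball]
    obtain ⟨prev, hv⟩ : ∃ v, bm.get? b = some v := by
      rw [PySem.Dict.contains_eq_isSome_get?] at hcont
      exact Option.isSome_iff_exists.mp hcont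
    have hgd : bm.getD b 0 = prev := PySem.Dict.getD_of_get?_eq_some bm 0 hv
    have hcnt : ∀ x, ((bm.insert b c).values.count x) + (if x = prev then 1 else 0)
        = bm.values.count x + (if x = c then 1 else 0) := by
      intro x
      have := count_values_insert_contains bm b c x h2 hcont
      rwa [hgd] at this
    have hprevmem : prev ∈ bm.values :=
      List.mem_map.mpr ⟨(b, prev), PySem.Dict.mem_items_of_get?_eq_some bm hv, rfl⟩
    have hprevpos : 0 < bm.values.count prev := List.count_pos_iff.mpr hprevmem
    simp only [stepA, hcont, if_true, PySem.Dict.modify, hgd]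
    have hcm1g : ∀ x, (cm.insert prev (cm.getD prev 0 - 1)).getD x 0 =
        if x = prev then (bm.values.count prev : Int) - 1 else (bm.values.count x : Int) := by
      intro x
      rw [PySem.Dict.getD_insert, h3 prev, h3 x]
    have hcm1c : ∀ x, (cm.insert prev (cm.getD prev 0 - 1)).contains x
        = (x == prev || cm.contains x) := by
      intro x
      rw [PySem.Dict.contains_insert]
    have hcm1nd : (cm.insert prev (cm.getD prev 0 - 1)).keys.Nodup :=
      PySem.Dict.nodup_keys_insert cm prev _ h1
    by_cases hone : ((cm.insert prev (cm.getD prev 0 - 1)).getD prev 0 == 0) = true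
    · -- last ball of prev: the color is erased
      have honev : bm.values.count prev = 1 := by
        have hg := hcm1g prev
        rw [if_pos rfl] at hg
        simp only [beq_iff_eq] at hone
        omega
      rw [if_pos hone]
      refine ⟨PySem.Dict.nodup_keys_insert _ c _
          (nodup_keys_erase _ prev hcm1nd), hbmnd, ?_, ?_⟩
      · intro x
        have hc := hcnt x
        rw [PySem.Dict.getD_insert]
        by_cases hxc : x = c
        · obtain rfl := hxc
          rw [if_pos rfl, getD_erase]
          by_cases hxp : x = prev
          · obtain rfl := hxp
            rw [if_pos rfl]
            simp at hc
            omega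
          · rw [if_neg hxp, hcm1g x, if_neg hxp]
            simp [hxp] at hc
            omega
        · rw [if_neg hxc, getD_erase]
          by_cases hxp : x = prev
          · obtain rfl := hxp
            rw [if_pos rfl]
            simp [hxc] at hc
            omega
          · rw [if_neg hxp, hcm1g x, if_neg hxp]
            simp [hxp, hxc] at hc
            omega
      · intro x
        have hc := hcnt x
        rw [PySem.Dict.contains_insert]
        by_cases hxc : x = c
        · obtain rfl := hxc
          simp only [BEq.rfl, Bool.true_or, true_iff]
          by_cases hxp : x = prev
          · obtain rfl := hxp
            simp at hc
            omega
          · simp [hxp] at hc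
            omega
        · have hxcb : (x == c) = false := beq_eq_false_iff_ne.mpr hxc
          rw [hxcb, Bool.false_or, contains_erase]
          by_cases hxp : x = prev
          · obtain rfl := hxp
            rw [if_pos rfl]
            simp [hxc] at hc
            simp only [Bool.false_eq_true, false_iff]
            omega
          · rw [if_neg hxp, hcm1c x]
            have hxpb : (x == prev) = false := beq_eq_false_iff_ne.mpr hxp
            rw [hxpb, Bool.false_or, h4 x]
            simp [hxp, hxc] at hc
            omega
    · -- prev still colors other balls
      have honev : bm.values.count prev ≠ 1 := by
        intro he
        have hg := hcm1g prev
        rw [if_pos rfl, he] at hg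
        simp only [beq_iff_eq, hg] at hone
        exact hone rfl
      rw [if_neg (by simpa using hone)]
      refine ⟨PySem.Dict.nodup_keys_insert _ c _ hcm1nd, hbmnd, ?_, ?_⟩
      · intro x
        have hc := hcnt x
        rw [PySem.Dict.getD_insert]
        by_cases hxc : x = c
        · obtain rfl := hxc
          rw [if_pos rfl, hcm1g x]
          by_cases hxp : x = prev
          · obtain rfl := hxp
            rw [if_pos rfl]
            simp at hc
            omega
          · rw [if_neg hxp]
            simp [hxp] at hc
            omega
        · rw [if_neg hxc, hcm1g x]
          by_cases hxp : x = prev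
          · obtain rfl := hxp
            rw [if_pos rfl]
            simp [hxc] at hc
            omega
          · rw [if_neg hxp]
            simp [hxp, hxc] at hc
            omega
      · intro x
        have hc := hcnt x
        rw [PySem.Dict.contains_insert]
        by_cases hxc : x = c
        · obtain rfl := hxc
          simp only [BEq.rfl, Bool.true_or, true_iff]
          by_cases hxp : x = prev
          · obtain rfl := hxp
            simp at hc
            omega
          · simp [hxp] at hc
            omega
        · have hxcb : (x == c) = false := beq_eq_false_iff_ne.mpr hxc
          rw [hxcb, Bool.false_or, hcm1c x]
          by_cases hxp : x = prev
          · obtain rfl := hxp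
            simp only [BEq.rfl, Bool.true_or, true_iff]
            simp [hxc] at hc
            omega
          · have hxpb : (x == prev) = false := beq_eq_false_iff_ne.mpr hxp
            rw [hxpb, Bool.false_or, h4 x]
            simp [hxp, hxc] at hc
            omega
  · -- a fresh ball
    have hcontf : bm.contains b = false := by
      cases hcb : bm.contains b
      · rfl
      · exact absurd hcb hcont
    have hcnt := fun x => count_values_insert_fresh bm b c x hcontf
    simp only [stepA, hcontf, Bool.false_eq_true, if_false]
    refine ⟨PySem.Dict.nodup_keys_insert cm c _ h1, hbmnd, ?_, ?_⟩
    · intro x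
      have hc := hcnt x
      rw [PySem.Dict.getD_insert, hc, h3 x]
      by_cases hxc : x = c
      · obtain rfl := hxc
        rw [if_pos rfl, h3 x]
        simp
      · rw [if_neg hxc, if_neg hxc]
        simp
    · intro x
      have hc := hcnt x
      rw [PySem.Dict.contains_insert, hc]
      by_cases hxc : x = c
      · obtain rfl := hxc
        simp
      · have hxcb : (x == c) = false := beq_eq_false_iff_ne.mpr hxc
        rw [hxcb, Bool.false_or, h4 x, if_neg hxc]
        omega

lemma stepA_snd (cm bm : PySem.Dict Int Int) (res : List Int) (b c : Int) :
    (stepA (cm, bm, res) [b, c]).2 =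
      (bm.insert b c, res ++ [((stepA (cm, bm, res) [b, c]).1.size : Int)]) := by
  simp only [stepA]

lemma stepA_fst_res (cm bm : PySem.Dict Int Int) (res res' : List Int) (b c : Int) :
    (stepA (cm, bm, res) [b, c]).1 = (stepA (cm, bm, res') [b, c]).1 := by
  simp only [stepA]

lemma loop_eq : ∀ (qs : List (List Int)) (cm bm : PySem.Dict Int Int) (res : List Int),
    DictInv cm bm →
    (qs.foldl stepA (cm, bm, res)).2 = qs.foldl stepB (bm, res) := by
  intro qs
  induction qs with
  | nil => intro cm bm res _; rfl
  | cons q t ih =>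
    intro cm bm res h
    match q with
    | [] => exact ih cm bm res h
    | [a] => exact ih cm bm res h
    | a :: b' :: c' :: r => exact ih cm bm res h
    | [b, c] =>
      have hinv : DictInv (stepA (cm, bm, res) [b, c]).1 (bm.insert b c) := by
        rw [stepA_fst_res cm bm res []]
        exact inv_step ⟨h.1, h.2.1, h.2.2.1, h.2.2.2⟩ b c
      have hA : stepA (cm, bm, res) [b, c]
          = ((stepA (cm, bm, res) [b, c]).1, bm.insert b c,
             res ++ [((stepA (cm, bm, res) [b, c]).1.size : Int)]) := by
        rw [← stepA_snd]
      have hsz : ((stepA (cm, bm, res) [b, c]).1.size : Int)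
          = ((PySem.Set.ofList (bm.insert b c).values).length : Int) := by
        rw [size_eq_of_inv hinv]
      simp only [List.foldl_cons, stepB]
      rw [hA, ih _ _ _ hinv, hsz]

-- ===== VERDICT (by name: the statement is the Claim_ definition above) =====
theorem queryResults_spec : Claim_equal_queryResults := by
  intro limit queries _ _
  unfold Spec_queryResults queryResults queryResults_alt
  exact (loop_eq queries _ _ _ inv_empty).symm ▸ rfl
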